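-- pv_equiv track=rewrite | github.com/k-coredot/The-Self-Referential-Field | code/test_4d_alignment.py | get_plaquettes
-- ===== SOURCE A (Python) =====
-- def idx(coords, L):
--     x,y,z,t = [c%L for c in coords]
--     return x*L**3 + y*L**2 + z*L + t
--
-- def coords(i, L):
--     t = i % L; z = (i//L) % L; y = (i//L**2) % L; x = (i//L**3) % L
--     return [x,y,z,t]
--
-- def get_plaquettes(L, D):
--     """Return list of (site, mu, nu, [4 link indices])"""
--     plaqs = []
--     for i in range(L**D):
--         c = coords(i, L)
--         for mu in range(D):
--             for nu in range(mu+1, D):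
--                 # Forward plaquette: link(i,mu), link(i+mu,nu), link(i+nu,mu)^-1, link(i,nu)^-1
--                 c_mu = list(c); c_mu[mu] = (c_mu[mu]+1)%L
--                 c_nu = list(c); c_nu[nu] = (c_nu[nu]+1)%L
--                 l1 = i*D + mu                      # link (i, mu), forward
--                 l2 = idx(c_mu, L)*D + nu            # link (i+mu_hat, nu), forward
--                 l3 = idx(c_nu, L)*D + mu            # link (i+nu_hat, mu), backward
--                 l4 = i*D + nu                      # link (i, nu), backward
--                 plaqs.append((i, mu, nu, l1, l2, l3, l4))
--     return plaqs
-- ===== SOURCE B (Python) =====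
-- def _coords(i, L):
--     t = i % L; z = (i // L) % L; y = (i // L**2) % L; x = (i // L**3) % L
--     return [x, y, z, t]
--
-- def _idx(c, L):
--     x, y, z, t = [v % L for v in c]
--     return x * L**3 + y * L**2 + z * L + t
--
-- def get_plaquettes(L, D):
--     """Return list of (site, mu, nu, [4 link indices])"""
--     N = L ** D
--     # pass 1: adjacency table -- shift[i][mu] = index of site i with coordinate mu incremented mod L
--     shift = []
--     for i in range(N):
--         c = _coords(i, L)
--         row = []
--         for mu in range(D):
--             cm = list(c)
--             cm[mu] = (cm[mu] + 1) % L
--             row.append(_idx(cm, L))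
--         shift.append(row)
--     # pass 2: emit plaquettes by pure link-index arithmetic, no coordinate work
--     plaqs = []
--     for i, row in enumerate(shift):
--         for mu in range(D):
--             for nu in range(mu + 1, D):
--                 plaqs.append((i, mu, nu, i * D + mu,
--                               row[mu] * D + nu,
--                               row[nu] * D + mu,
--                               i * D + nu))
--     return plaqs
-- ===== Notes on version B (the rewrite author's own statement) =====
-- stated objective: faster
-- what changed: Replaces A's single triple loop that re-decodes/re-encodes coordinates for every (mu,nu) pair by two separate passes: a first pass over sites building a neighbour table shift[i][mu], and a second, differently shaped pass that emits each plaquette by pure link-index arithmetic from that table.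
import Mathlib
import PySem

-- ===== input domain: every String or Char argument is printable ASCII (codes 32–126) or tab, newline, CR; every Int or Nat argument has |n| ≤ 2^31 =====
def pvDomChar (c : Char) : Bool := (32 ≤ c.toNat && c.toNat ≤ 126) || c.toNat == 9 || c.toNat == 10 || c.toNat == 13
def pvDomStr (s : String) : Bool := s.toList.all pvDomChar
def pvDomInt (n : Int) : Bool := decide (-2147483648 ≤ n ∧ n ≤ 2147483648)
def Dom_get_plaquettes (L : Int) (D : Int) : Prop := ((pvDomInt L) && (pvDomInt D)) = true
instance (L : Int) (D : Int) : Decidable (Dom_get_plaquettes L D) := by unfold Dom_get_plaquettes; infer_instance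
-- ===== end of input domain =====

-- B builds a per-site neighbour table in a first pass and emits plaquettes from it in a second pass
-- (each coordinate bump is computed once per (site, direction) instead of twice per (site, mu, nu) pair).


-- ===== PORT A =====
-- L ** D for 0 ≤ D, by binary exponentiation (as CPython computes int **); equals L ^ D.toNat
def pypow (b : Int) (e : Nat) : Int :=
  if _h : e = 0 then 1
  else
    let half := pypow b (e / 2)
    if e % 2 = 0 then half * half else half * half * b
termination_by e
decreasing_by exact Nat.div_lt_self (Nat.pos_of_ne_zero _h) (by norm_num)

-- helper coords(i, L): exact (PySem floored // and %)
def pyCoords (i : Int) (L : Int) : List Int :=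
  let t := PySem.Int.mod i L
  let z := PySem.Int.mod (PySem.Int.floordiv i L) L
  let y := PySem.Int.mod (PySem.Int.floordiv i (L ^ 2)) L
  let x := PySem.Int.mod (PySem.Int.floordiv i (L ^ 3)) L
  [x, y, z, t]

-- helper idx(coords, L); unpacking a list of length ≠ 4 raises ValueError in Python (unreachable: every caller passes 4 elements)
def pyIdx (c : List Int) (L : Int) : Int :=
  match c.map (fun v => PySem.Int.mod v L) with
  | [x, y, z, t] => x * L ^ 3 + y * L ^ 2 + z * L + t
  | _ => 0

-- range(L**D): L ^ D.toNat is exact for 0 ≤ D (Pre_); Python raises for D < 0.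
-- c_mu[mu] = (c_mu[mu]+1)%L: list copy + in-place set, ported as List.set; exact for 0 ≤ mu < 4
-- (Pre_ gives D ≤ 4 whenever the loop body runs); Python raises IndexError beyond.
def get_plaquettes (L : Int) (D : Int) : List (Int × Int × Int × Int × Int × Int × Int) :=
  (PySem.List.pyRange 0 (pypow L D.toNat) 1).foldl (fun plaqs i =>
    let c := pyCoords i L
    (PySem.List.pyRange 0 D 1).foldl (fun plaqs mu =>
      (PySem.List.pyRange (mu + 1) D 1).foldl (fun plaqs nu =>
        let c_mu := c.set mu.toNat (PySem.Int.mod (PySem.List.pyGetD c mu 0 + 1) L)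
        let c_nu := c.set nu.toNat (PySem.Int.mod (PySem.List.pyGetD c nu 0 + 1) L)
        let l1 := i * D + mu
        let l2 := pyIdx c_mu L * D + nu
        let l3 := pyIdx c_nu L * D + mu
        let l4 := i * D + nu
        plaqs ++ [(i, mu, nu, l1, l2, l3, l4)]) plaqs) plaqs) []

-- ===== PORT B =====
def get_plaquettes_alt (L : Int) (D : Int) : List (Int × Int × Int × Int × Int × Int × Int) :=
  let N := pypow L D.toNat
  -- pass 1: shift[i][mu] = index of site i with coordinate mu incremented mod L
  let shift := (PySem.List.pyRange 0 N 1).foldl (fun shift i =>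
    let c := pyCoords i L
    let row := (PySem.List.pyRange 0 D 1).foldl (fun row mu =>
      let cm := c.set mu.toNat (PySem.Int.mod (PySem.List.pyGetD c mu 0 + 1) L)
      row ++ [pyIdx cm L]) []
    shift ++ [row]) []
  -- pass 2: emit plaquettes by pure link-index arithmetic from the table rows
  (PySem.List.enumerate shift 0).foldl (fun plaqs p =>
    let i := p.1
    let row := p.2
    (PySem.List.pyRange 0 D 1).foldl (fun plaqs mu =>
      (PySem.List.pyRange (mu + 1) D 1).foldl (fun plaqs nu =>
        plaqs ++ [(i, mu, nu, i * D + mu,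
                   PySem.List.pyGetD row mu 0 * D + nu,
                   PySem.List.pyGetD row nu 0 * D + mu,
                   i * D + nu)]) plaqs) plaqs) []

-- ===== PRECONDITION & SPEC =====
-- Pre_ is exactly the set of inputs on which the Python A returns normally: D < 0 raises TypeError,
-- L = 0 ∧ D = 0 raises ZeroDivisionError, and D > 4 with a nonempty site loop raises IndexError
-- (the site loop range(L**D) is empty iff L^D ≤ 0, i.e. iff L = 0 or L < 0 with D odd).
def Pre_get_plaquettes (L : Int) (D : Int) : Prop :=
  0 ≤ D ∧ ¬(L = 0 ∧ D = 0) ∧ (D ≤ 4 ∨ L = 0 ∨ (L < 0 ∧ D % 2 = 1))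
instance (L : Int) (D : Int) : Decidable (Pre_get_plaquettes L D) := by
  unfold Pre_get_plaquettes; infer_instance

def pvWitness_get_plaquettes : Int × Int := (2, 4)

def Spec_get_plaquettes (L : Int) (D : Int) (out : List (Int × Int × Int × Int × Int × Int × Int)) : Prop := out = get_plaquettes_alt L D
instance (L : Int) (D : Int) (out : List (Int × Int × Int × Int × Int × Int × Int)) : Decidable (Spec_get_plaquettes L D out) := by
  unfold Spec_get_plaquettes
  letI : DecidableEq (Int × Int × Int × Int × Int × Int × Int) := fun a b => instDecidableEqProd a b
  infer_instance

-- ===== CLAIM (what is proved, stated in full; the proofs are below) =====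
def Claim_equal_get_plaquettes : Prop := ∀ (L : Int) (D : Int), Dom_get_plaquettes L D → Pre_get_plaquettes L D → Spec_get_plaquettes L D (get_plaquettes L D)

-- ===== LEMMAS AND PROOFS =====

-- enumerate over a mapped range pairs each index with its image
lemma enumerate_map_pyRange {α : Type} (f : Int → α) (b : Int) :
    ∀ (n : Nat) (a : Int), (b - a).toNat = n →
      PySem.List.enumerate ((PySem.List.pyRange a b 1).map f) a
        = (PySem.List.pyRange a b 1).map (fun i => (i, f i)) := by
  intro n
  induction n with
  | zero =>
    intro a h
    rw [PySem.List.pyRange_one_eq_nil (by omega)]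
    rfl
  | succ n ih =>
    intro a h
    rw [PySem.List.pyRange_one_cons (by omega)]
    simp only [List.map_cons]
    show (a, f a) :: PySem.List.enumerate _ (a + 1) = _
    rw [ih (a + 1) (by omega)]

-- ===== VERDICT (by name: the statement is the Claim_ definition above) =====
theorem get_plaquettes_spec : Claim_equal_get_plaquettes := by
  intro L D _ _
  unfold Spec_get_plaquettes get_plaquettes get_plaquettes_alt
  simp only [PySem.List.foldl_append_singleton_eq_map, PySem.List.foldl_append_eq_flatMap,
    List.nil_append]
  rw [enumerate_map_pyRange _ _ (pypow L D.toNat).toNat 0 (by omega), List.flatMap_map]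
  apply List.flatMap_congr
  intro i hi
  apply List.flatMap_congr
  intro mu hmu
  apply List.map_congr_left
  intro nu hnu
  rw [PySem.List.mem_pyRange_one] at hi hmu hnu
  rw [PySem.List.pyGetD_map_pyRange_of_nonneg _ _ _ _ hmu.1 hmu.2,
      PySem.List.pyGetD_map_pyRange_of_nonneg _ _ _ _ (by omega : (0:Int) ≤ nu) (by omega : nu < D)]
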